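-- pv_equiv track=rewrite | github.com/UlsanCollege-English/week-2-harbor-rescue-inventory-sushant913 | src/challenges.py | supply_report
-- ===== SOURCE A (Python) =====
-- def supply_report(items: list[object], target: object) -> tuple[int, int]:
--     """Return (count, first_index) for ``target`` in ``items``.
--
--     Return (0, -1) if the target does not appear.
--     """
--     count = 0
--     first_index = -1
--
--     for i in range(len(items)):
--         if items[i] == target:
--             count += 1
--             if first_index == -1:
--                 first_index = i
--
--     return (count, first_index)
-- ===== SOURCE B (Python) =====
-- def supply_report(items: list[object], target: object) -> tuple[int, int]:
--     """Return (count, first_index) for ``target`` in ``items``.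
--
--     Return (0, -1) if the target does not appear.
--
--     Divide and conquer: split the range in half, solve each half,
--     and merge (counts add; the first index is the left half's unless absent).
--     """
--     def solve(lo: int, hi: int) -> tuple[int, int]:
--         if hi - lo == 0:
--             return (0, -1)
--         if hi - lo == 1:
--             return (1, lo) if items[lo] == target else (0, -1)
--         mid = (lo + hi) // 2
--         c1, f1 = solve(lo, mid)
--         c2, f2 = solve(mid, hi)
--         return (c1 + c2, f1 if f1 != -1 else f2)
--     return solve(0, len(items))
-- ===== Notes on version B (the rewrite author's own statement) =====
-- stated objective: alternative
-- what changed: Replaces A's single left-to-right counting-and-latching loop with a divide-and-conquer recursion that splits the index range in half, solves each half, and merges (counts add, first index taken from the left half unless absent).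
import Mathlib
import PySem

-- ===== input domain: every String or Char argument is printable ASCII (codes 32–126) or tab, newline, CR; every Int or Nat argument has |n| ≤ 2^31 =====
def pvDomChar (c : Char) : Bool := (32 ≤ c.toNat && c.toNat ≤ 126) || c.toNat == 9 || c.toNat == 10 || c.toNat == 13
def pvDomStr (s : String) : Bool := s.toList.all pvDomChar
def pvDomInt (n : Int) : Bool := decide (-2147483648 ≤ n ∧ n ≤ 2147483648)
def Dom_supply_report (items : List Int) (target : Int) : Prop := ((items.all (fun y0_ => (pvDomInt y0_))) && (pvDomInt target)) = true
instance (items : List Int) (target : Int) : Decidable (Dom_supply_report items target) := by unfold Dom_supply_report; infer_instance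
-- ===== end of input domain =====

-- B replaces A's single left-to-right counting-and-latching loop with a
-- divide-and-conquer recursion over the index range (merge: counts add, first
-- index from the left half unless absent): an alternative algorithm, same O(n).


-- ===== PORT A =====
-- for i in range(len(items)): if items[i] == target: count += 1; if first_index == -1: first_index = i
def supply_report (items : List Int) (target : Int) : Int × Int :=
  (PySem.List.pyRange 0 (items.length) 1).foldl
    (fun (st : Int × Int) i =>
      if PySem.List.pyGetD items i 0 == target then
        (st.1 + 1, if st.2 == -1 then i else st.2)
      else st)
    (0, -1)

-- ===== PORT B =====
-- def solve(lo, hi): … recursion on the half-open range [lo, hi); lo, hi are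
-- nonnegative Python ints, so Nat indices are exact (mid = (lo+hi)//2 = Nat division).
-- fuel = size of the range; it only bounds the recursion depth (hi - lo shrinks
-- each call), the algorithm is Source B's divide and conquer unchanged.
def spAltSolve (items : List Int) (target : Int) (fuel lo hi : Nat) : Int × Int :=
  match fuel with
  | 0 => (0, -1)
  | fuel + 1 =>
    if hi - lo = 0 then (0, -1)
    else if hi - lo = 1 then
      if PySem.List.pyGetD items (lo : Int) 0 == target then (1, (lo : Int)) else (0, -1)
    else
      let mid := (lo + hi) / 2
      let p1 := spAltSolve items target fuel lo mid
      let p2 := spAltSolve items target fuel mid hi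
      (p1.1 + p2.1, if p1.2 ≠ -1 then p1.2 else p2.2)

def supply_report_alt (items : List Int) (target : Int) : Int × Int :=
  spAltSolve items target items.length 0 items.length

-- ===== PRECONDITION & SPEC =====
def Spec_supply_report (items : List Int) (target : Int) (out : Int × Int) : Prop := out = supply_report_alt items target
instance (items : List Int) (target : Int) (out : Int × Int) : Decidable (Spec_supply_report items target out) := by unfold Spec_supply_report; infer_instance

-- ===== CLAIM (what is proved, stated in full; the proofs are below) =====
def Claim_equal_supply_report : Prop := ∀ (items : List Int) (target : Int), Dom_supply_report items target → Spec_supply_report items target (supply_report items target)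

-- ===== LEMMAS AND PROOFS =====

-- Reference value of either program on a segment, expressed with count / index?.
def segRes (items : List Int) (target : Int) (lo hi : Nat) : Int × Int :=
  ((((items.drop lo).take (hi - lo)).count target : Nat),
   match PySem.List.index? ((items.drop lo).take (hi - lo)) target with
   | some k => ((lo + k : Nat) : Int)
   | none => -1)

lemma index?_append_of_not_mem (l t : List Int) (v : Int) (h : v ∉ l) :
    PySem.List.index? (l ++ t) v = (PySem.List.index? t v).map (l.length + ·) := by
  induction l with
  | nil => simp
  | cons x l ih =>
    have hx : x ≠ v := by intro hv; exact h (hv ▸ List.mem_cons_self)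
    rw [List.cons_append, PySem.List.index?_cons_of_ne (l ++ t) hx,
        ih (fun hm => h (List.mem_cons_of_mem x hm))]
    cases PySem.List.index? t v with
    | none => simp
    | some k => simp; omega

-- Invariant of A's loop, as a fold over the enumerated list (left-to-right scan).
lemma supply_loop_eq (t : Int) (xs : List Int) : ∀ (s : Int), 0 ≤ s → ∀ (c fi : Int),
    (PySem.List.enumerate xs s).foldl
      (fun (st : Int × Int) p =>
        if p.2 == t then (st.1 + 1, if st.2 == -1 then p.1 else st.2) else st)
      (c, fi)
    = (c + (xs.count t : Nat),
       if fi = -1 then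
         (match PySem.List.index? xs t with
          | some k => s + (k : Nat)
          | none => -1)
       else fi) := by
  induction xs with
  | nil => intro s hs c fi; simp [PySem.List.enumerate_nil, PySem.List.index?]
  | cons x xs ih =>
    intro s hs c fi
    rw [PySem.List.enumerate_cons, List.foldl_cons]
    by_cases hx : x = t
    · subst hx
      rw [PySem.List.index?_cons_self]
      simp only [BEq.rfl, if_true]
      rw [ih (s + 1) (by omega)]
      by_cases h : fi = -1
      · have hs' : ¬ (s = -1) := by omega
        simp [h, hs']
        omega
      · simp [h]
        omega
    · rw [PySem.List.index?_cons_of_ne xs hx]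
      have hbe : (x == t) = false := by simp [hx]
      simp only [hbe, Bool.false_eq_true, if_false]
      rw [ih (s + 1) (by omega)]
      by_cases h : fi = -1
      · cases hidx : PySem.List.index? xs t with
        | none => simp [h, hx]
        | some k =>
          simp [h, hx]
          ring
      · simp [h, hx]

-- A's value, in closed form.
lemma supply_report_eq_segRes (items : List Int) (target : Int) :
    supply_report items target = segRes items target 0 items.length := by
  unfold supply_report
  have hA : (PySem.List.pyRange 0 (items.length) 1).foldl
      (fun (st : Int × Int) i =>
        if PySem.List.pyGetD items i 0 == target then
          (st.1 + 1, if st.2 == -1 then i else st.2)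
        else st) (0, -1)
      = (PySem.List.enumerate items 0).foldl
          (fun (st : Int × Int) p =>
            if p.2 == target then (st.1 + 1, if st.2 == -1 then p.1 else st.2) else st)
          (0, -1) := by
    rw [PySem.List.enumerate_eq_map_pyRange items 0, List.foldl_map]
    rfl
  rw [hA, supply_loop_eq target items 0 (by omega) 0 (-1)]
  unfold segRes
  simp only [List.drop_zero, Nat.sub_zero, List.take_length, zero_add]
  cases PySem.List.index? items target with
  | none => simp
  | some k => simp

-- B's recursion computes segRes on every in-bounds segment.
lemma spAltSolve_eq_segRes (items : List Int) (target : Int) :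
    ∀ (n lo hi : Nat), hi - lo ≤ n → hi ≤ items.length →
      spAltSolve items target n lo hi = segRes items target lo hi := by
  intro n
  induction n with
  | zero =>
    intro lo hi hn hlen
    have h0 : hi - lo = 0 := by omega
    unfold segRes
    simp [spAltSolve, h0]
  | succ n ih =>
    intro lo hi hn hlen
    by_cases h0 : hi - lo = 0
    · unfold segRes
      simp [spAltSolve, h0]
    · by_cases h1 : hi - lo = 1
      · rw [spAltSolve, if_neg h0, if_pos h1]
        have hlo : lo < items.length := by omega
        have hget : PySem.List.pyGetD items (lo : Int) 0 = items[lo] := by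
          simp [PySem.List.pyGetD, PySem.List.pyGet?, PySem.List.pyIdx?, hlo]
        have hseg : (items.drop lo).take (hi - lo) = [items[lo]] := by
          rw [h1, List.take_one, List.head?_drop]
          simp [hlo]
        unfold segRes
        rw [hseg, hget]
        by_cases hx : items[lo] = target
        · rw [if_pos (by simp [hx]), hx, PySem.List.index?_cons_self]
          simp [hx]
        · rw [if_neg (by simp [hx]), PySem.List.index?_cons_of_ne [] hx]
          simp [hx, PySem.List.index?]
      · rw [spAltSolve, if_neg h0, if_neg h1]
        dsimp only
        have hmid1 : (lo + hi) / 2 - lo ≤ n := by omega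
        have hmid2 : hi - (lo + hi) / 2 ≤ n := by omega
        have hmle : (lo + hi) / 2 ≤ items.length := by omega
        rw [ih lo ((lo + hi) / 2) hmid1 hmle, ih ((lo + hi) / 2) hi hmid2 hlen]
        -- merge the two segment results
        set mid := (lo + hi) / 2 with hm
        have hlomid : lo ≤ mid := by omega
        have hmidhi : mid ≤ hi := by omega
        have hsplit : (items.drop lo).take (hi - lo)
            = (items.drop lo).take (mid - lo) ++ (items.drop mid).take (hi - mid) := by
          have : hi - lo = (mid - lo) + (hi - mid) := by omega
          rw [this, List.take_add]
          congr 1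
          rw [List.drop_drop]
          rw [show lo + (mid - lo) = mid by omega]
        have hlen1 : ((items.drop lo).take (mid - lo)).length = mid - lo := by
          simp; omega
        unfold segRes
        rw [hsplit]
        set s1 := (items.drop lo).take (mid - lo)
        set s2 := (items.drop mid).take (hi - mid)
        have hcnt : ((s1 ++ s2).count target : Int)
            = ((s1.count target : Nat) : Int) + ((s2.count target : Nat) : Int) := by
          rw [List.count_append]; push_cast; ring
        refine Prod.ext (by simpa using hcnt) ?_
        by_cases hmem : target ∈ s1
        · rw [PySem.List.index?_append_of_mem s2 hmem]
          cases hidx : PySem.List.index? s1 target with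
          | none => exact absurd ((PySem.List.index?_eq_none_iff s1 target).mp hidx) (by simpa using hmem)
          | some k =>
            simp [hidx]
            intro h
            omega
        · have hidx1 : PySem.List.index? s1 target = none :=
            (PySem.List.index?_eq_none_iff s1 target).mpr hmem
          rw [index?_append_of_not_mem s1 s2 target hmem]
          cases hidx2 : PySem.List.index? s2 target with
          | none =>
            rw [PySem.List.index?_eq_idxOf?] at hidx1
            simp [hidx1]
          | some k =>
            rw [PySem.List.index?_eq_idxOf?] at hidx1
            simp [hidx1]
            omega

-- ===== VERDICT (by name: the statement is the Claim_ definition above) =====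
theorem supply_report_spec : Claim_equal_supply_report := by
  intro items target _
  unfold Spec_supply_report supply_report_alt
  rw [supply_report_eq_segRes,
      spAltSolve_eq_segRes items target items.length 0 items.length (by omega) (le_refl _)]
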